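-- pv_equiv track=rewrite | github.com/aidantiu/dsa_portfolio | portfolio/app/routes/infix_to_postfix.py | is_valid_expression
-- ===== SOURCE A (Python) =====
-- def is_operator(char):
--     return char in "+-*/^−∗"
--
-- def is_valid_expression(expression):
--     expression = expression.replace('−', '-').replace('∗', '*')
--
--     stack = []
--     valid_chars = set("0123456789+-*/^()abcdefghijklmnopqrstuvwxyzABCDEFGHIJKLMNOPQRSTUVWXYZ")
--     last_char = ""
--
--     expression = expression.replace(" ", "")
--
--     for i, char in enumerate(expression):
--         if char not in valid_chars:
--             return False
--
--         if char == "(":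
--             stack.append(char)
--
--         elif char == ")":
--             if not stack:
--                 return False
--             stack.pop()
--
--         elif is_operator(char):
--             if i == 0 and char != '-':
--                 return False
--             if i > 0 and is_operator(expression[i-1]) and char != '-':
--                 return False
--
--         elif char.isalnum():
--             if last_char and last_char.isalnum():
--                 continue
--
--         last_char = char
--
--     if stack or (last_char and not (last_char.isalnum() or last_char == ")")):
--         return False
--
--     return True
-- ===== SOURCE B (Python) =====
-- def is_valid_expression(expression):
--     expr = expression.replace('−', '-').replace('∗', '*').replace(" ", "")
--     if not expr:
--         return True
--     allowed = "0123456789+-*/^()abcdefghijklmnopqrstuvwxyzABCDEFGHIJKLMNOPQRSTUVWXYZ"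
--     # pass 1: every character must be allowed
--     if any(c not in allowed for c in expr):
--         return False
--     # pass 2: parenthesis depth, early False on close at depth 0, balanced at the end
--     depth = 0
--     for c in expr:
--         if c == '(':
--             depth += 1
--         elif c == ')':
--             if depth == 0:
--                 return False
--             depth -= 1
--     if depth != 0:
--         return False
--     # pass 3: operator placement (a non-'-' operator may not start nor follow an operator)
--     ops = "+-*/^"
--     prev = ""
--     for c in expr:
--         if c in ops and c != '-' and (prev == "" or prev in ops):
--             return False
--         prev = c
--     # the expression must end with an alphanumeric or ')'
--     return expr[-1].isalnum() or expr[-1] == ')'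
-- ===== Notes on version B (the rewrite author's own statement) =====
-- stated objective: simpler
-- what changed: A's single fused loop (stack, enumerate index lookback, last_char with a continue quirk) is split into independent passes: an all-characters-allowed scan, a parenthesis-depth counter scan, an operator-placement scan carrying the previous character, and a direct test on the final character.
import Mathlib
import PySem

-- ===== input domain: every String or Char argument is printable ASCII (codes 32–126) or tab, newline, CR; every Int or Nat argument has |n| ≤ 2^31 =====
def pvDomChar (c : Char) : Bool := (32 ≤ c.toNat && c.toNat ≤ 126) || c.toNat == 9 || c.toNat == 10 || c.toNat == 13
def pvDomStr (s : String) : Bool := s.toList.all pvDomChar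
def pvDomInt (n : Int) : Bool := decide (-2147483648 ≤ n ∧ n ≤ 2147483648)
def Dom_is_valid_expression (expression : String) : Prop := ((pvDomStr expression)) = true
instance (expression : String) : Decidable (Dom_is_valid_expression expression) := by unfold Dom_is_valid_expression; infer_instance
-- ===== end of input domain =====

-- B splits A's single fused validation loop into independent passes (allowed chars, paren depth, operator placement, final char); return value proved equal.


-- ===== PORT A =====
-- char in "+-*/^−∗"
def pvIsOperatorA (c : Char) : Bool := "+-*/^−∗".toList.contains c

def pvValidCharsA : List Char := "0123456789+-*/^()abcdefghijklmnopqrstuvwxyzABCDEFGHIJKLMNOPQRSTUVWXYZ".toList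

-- A's fused loop: index i, stack, last_char (none = ""); none = early `return False`
def pvALoop (full : List Char) : List Char → Nat → List Char → Option Char → Option (List Char × Option Char)
  | [], _, stack, last => some (stack, last)
  | c :: cs, i, stack, last =>
    if !pvValidCharsA.contains c then none
    else if c = '(' then pvALoop full cs (i+1) (c :: stack) (some c)
    else if c = ')' then
      match stack with
      | [] => none
      | _ :: s => pvALoop full cs (i+1) s (some c)
    else if pvIsOperatorA c then
      if i == 0 && c != '-' then none
      else if decide (0 < i) && (full[i-1]?).elim false pvIsOperatorA && c != '-' then none
      else pvALoop full cs (i+1) stack (some c)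
    else if PySem.Chars.isalnum c then
      if last.elim false PySem.Chars.isalnum then pvALoop full cs (i+1) stack last  -- continue: last_char kept
      else pvALoop full cs (i+1) stack (some c)
    else pvALoop full cs (i+1) stack (some c)

def is_valid_expression (expression : String) : Bool :=
  let expr := PySem.Str.replace (PySem.Str.replace (PySem.Str.replace expression "−" "-") "∗" "*") " " ""
  let l := expr.toList
  match pvALoop l l 0 [] none with
  | none => false
  | some (stack, last) =>
    if !stack.isEmpty || last.elim false (fun c => !(PySem.Chars.isalnum c || c == ')')) then false
    else true

-- ===== PORT B =====
def pvAllowedB : List Char := "0123456789+-*/^()abcdefghijklmnopqrstuvwxyzABCDEFGHIJKLMNOPQRSTUVWXYZ".toList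
def pvOpsB : List Char := "+-*/^".toList

-- pass 2: parenthesis depth; none = close at depth 0
def pvDepthLoop : List Char → Nat → Option Nat
  | [], d => some d
  | c :: cs, d =>
    if c = '(' then pvDepthLoop cs (d+1)
    else if c = ')' then
      match d with
      | 0 => none
      | d' + 1 => pvDepthLoop cs d'
    else pvDepthLoop cs d

-- pass 3: operator placement, carrying the previous char (none = start); false = bad
def pvOpLoop : List Char → Option Char → Bool
  | [], _ => true
  | c :: cs, prev =>
    if pvOpsB.contains c && c != '-' && prev.elim true pvOpsB.contains then false
    else pvOpLoop cs (some c)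

def is_valid_expression_alt (expression : String) : Bool :=
  let expr := PySem.Str.replace (PySem.Str.replace (PySem.Str.replace expression "−" "-") "∗" "*") " " ""
  let l := expr.toList
  if l.isEmpty then true
  else if l.any (fun c => !pvAllowedB.contains c) then false
  else
    match pvDepthLoop l 0 with
    | none => false
    | some d =>
      if d != 0 then false
      else if !pvOpLoop l none then false
      else l.getLast?.elim false (fun c => PySem.Chars.isalnum c || c == ')')

-- ===== PRECONDITION & SPEC =====
def Spec_is_valid_expression (expression : String) (out : Bool) : Prop := out = is_valid_expression_alt expression
instance (expression : String) (out : Bool) : Decidable (Spec_is_valid_expression expression out) := by unfold Spec_is_valid_expression; infer_instance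

-- ===== CLAIM (what is proved, stated in full; the proofs are below) =====
def Claim_equal_is_valid_expression : Prop := ∀ (expression : String), Dom_is_valid_expression expression → Spec_is_valid_expression expression (is_valid_expression expression)

-- ===== LEMMAS AND PROOFS =====

-- reference fused scan used as a bridge: A's loop with the stack as a depth and the index as the previous char
def pvRef : List Char → Option Char → Nat → Option Nat
  | [], _, d => some d
  | c :: cs, prev, d =>
    if !pvValidCharsA.contains c then none
    else if c = '(' then pvRef cs (some c) (d+1)
    else if c = ')' then
      match d with
      | 0 => none
      | d' + 1 => pvRef cs (some c) d'
    else if pvIsOperatorA c then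
      if prev.elim true pvIsOperatorA && c != '-' then none
      else pvRef cs (some c) d
    else pvRef cs (some c) d

-- A's last_char update as a fold step
def pvF (last : Option Char) (c : Char) : Option Char :=
  if PySem.Chars.isalnum c && last.elim false PySem.Chars.isalnum then last else some c

lemma pvOpA_eq_opB {c : Char} (h : pvValidCharsA.contains c = true) :
    pvIsOperatorA c = pvOpsB.contains c := by
  have hall : pvValidCharsA.all (fun c => pvIsOperatorA c == pvOpsB.contains c) = true := by decide
  have hm : c ∈ pvValidCharsA := by simpa using h
  simpa using List.all_eq_true.mp hall c hm

lemma pvOpLoop_cons (c : Char) (cs : List Char) (prev : Option Char) :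
    pvOpLoop (c :: cs) prev =
      if pvOpsB.contains c && c != '-' && prev.elim true pvOpsB.contains then false
      else pvOpLoop cs (some c) := rfl

lemma pvDepthLoop_cons (c : Char) (cs : List Char) (d : Nat) :
    pvDepthLoop (c :: cs) d =
      if c = '(' then pvDepthLoop cs (d+1)
      else if c = ')' then (match d with | 0 => none | d' + 1 => pvDepthLoop cs d')
      else pvDepthLoop cs d := rfl

lemma pvRef_cons (c : Char) (cs : List Char) (prev : Option Char) (d : Nat) :
    pvRef (c :: cs) prev d =
      (if !pvValidCharsA.contains c then none
       else if c = '(' then pvRef cs (some c) (d+1)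
       else if c = ')' then (match d with | 0 => none | d' + 1 => pvRef cs (some c) d')
       else if pvIsOperatorA c then
         if prev.elim true pvIsOperatorA && c != '-' then none
         else pvRef cs (some c) d
       else pvRef cs (some c) d) := rfl


lemma pvRef_eq (rest : List Char) : ∀ (prev : Option Char) (d : Nat),
    prev.elim True (fun p => pvValidCharsA.contains p = true) →
    pvRef rest prev d =
      if rest.all (fun c => pvValidCharsA.contains c) && pvOpLoop rest prev then pvDepthLoop rest d
      else none := by
  induction rest with
  | nil => intro prev d _; rfl
  | cons c cs ih =>
    intro prev d hprev
    rw [pvRef_cons, pvOpLoop_cons, pvDepthLoop_cons, List.all_cons]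
    by_cases hv : pvValidCharsA.contains c = true
    · have hvm : c ∈ pvValidCharsA := by simpa using hv
      by_cases hcp : c = '('
      · subst hcp
        rw [ih (some '(') (d+1) hv]
        cases hA : cs.all (fun c => pvValidCharsA.contains c) <;>
          cases hO : pvOpLoop cs (some '(') <;>
            simp [hA, hO, hvm, (by decide : '(' ∉ pvOpsB)]
      · by_cases hcq : c = ')'
        · subst hcq
          cases d with
          | zero =>
            cases hA : cs.all (fun c => pvValidCharsA.contains c) <;>
              cases hO : pvOpLoop cs (some ')') <;>
                simp [hA, hO, hvm, (by decide : ')' ∉ pvOpsB)]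
          | succ d' =>
            cases hA : cs.all (fun c => pvValidCharsA.contains c) <;>
              cases hO : pvOpLoop cs (some ')') <;>
                simp [ih (some ')') d' hv, hA, hO, hvm, (by decide : ')' ∉ pvOpsB)] <;>
                  simp_all [List.all_eq_true]
        · by_cases hop : pvIsOperatorA c = true
          · have hopB : pvOpsB.contains c = true := (pvOpA_eq_opB hv).symm.trans hop
            have hopBm : c ∈ pvOpsB := by simpa using hopB
            have hprevB : prev.elim true pvOpsB.contains = prev.elim true pvIsOperatorA := by
              cases prev with
              | none => rfl
              | some p => exact (pvOpA_eq_opB hprev).symm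
            rw [hprevB]
            by_cases hbad : (prev.elim true pvIsOperatorA && c != '-') = true
            · rw [Bool.and_eq_true] at hbad
              simp [hvm, hcp, hcq, hop, hopBm, hbad.1, hbad.2]
            · rw [ih (some c) d hv]
              rw [Bool.and_eq_true] at hbad
              push_neg at hbad
              cases hpo : prev.elim true pvIsOperatorA with
              | true =>
                have hdash : (c != '-') = false := by
                  cases h : (c != '-') with
                  | true => exact absurd h (by simpa [hpo] using hbad)
                  | false => rfl
                simp [hvm, hcp, hcq, hop, hpo, hdash]
              | false =>
                cases hA : cs.all (fun c => pvValidCharsA.contains c) <;>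
                  cases hO : pvOpLoop cs (some c) <;>
                    simp [hvm, hcp, hcq, hop, hpo, hA, hO]
          · have hnopB : pvOpsB.contains c = false := by
              rw [← pvOpA_eq_opB hv]; simpa using hop
            have hnopBm : c ∉ pvOpsB := by simpa using hnopB
            rw [ih (some c) d hv]
            cases hA : cs.all (fun c => pvValidCharsA.contains c) <;>
              cases hO : pvOpLoop cs (some c) <;>
                simp [hvm, hcp, hcq, hop, hnopBm, hA, hO]
    · have hvm : c ∉ pvValidCharsA := by simpa using hv
      simp [hvm]


lemma pvALoop_cons (full : List Char) (c : Char) (cs : List Char) (i : Nat)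
    (stack : List Char) (last : Option Char) :
    pvALoop full (c :: cs) i stack last =
      (if !pvValidCharsA.contains c then none
       else if c = '(' then pvALoop full cs (i+1) (c :: stack) (some c)
       else if c = ')' then
         (match stack with
          | [] => none
          | _ :: s => pvALoop full cs (i+1) s (some c))
       else if pvIsOperatorA c then
         if i == 0 && c != '-' then none
         else if decide (0 < i) && (full[i-1]?).elim false pvIsOperatorA && c != '-' then none
         else pvALoop full cs (i+1) stack (some c)
       else if PySem.Chars.isalnum c then
         if last.elim false PySem.Chars.isalnum then pvALoop full cs (i+1) stack last
         else pvALoop full cs (i+1) stack (some c)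
       else pvALoop full cs (i+1) stack (some c)) := rfl

lemma pvALoop_eq (rest : List Char) : ∀ (done : List Char) (d : Nat) (last : Option Char),
    pvALoop (done ++ rest) rest done.length (List.replicate d '(') last =
      (pvRef rest done.getLast? d).map (fun d' => (List.replicate d' '(', rest.foldl pvF last)) := by
  induction rest with
  | nil => intro done d last; rfl
  | cons c cs ih =>
    intro done d last
    rw [pvALoop_cons, pvRef_cons, List.foldl_cons]
    rw [show done ++ c :: cs = (done ++ [c]) ++ cs by simp]
    have hIH := ih (done ++ [c])
    rw [(by simp : (done ++ [c]).length = done.length + 1), List.getLast?_concat] at hIH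
    by_cases hv : pvValidCharsA.contains c = true
    · rw [hv, Bool.not_true]
      by_cases hcp : c = '('
      · subst hcp
        have hF : pvF last '(' = some '(' := by
          simp [pvF, (by decide : PySem.Chars.isalnum '(' = false)]
        simp only [Bool.false_eq_true, if_false]
        rw [← List.replicate_succ, hIH (d+1) (some '(')]
        simp [hF]
      · by_cases hcq : c = ')'
        · subst hcq
          have hF : pvF last ')' = some ')' := by
            simp [pvF, (by decide : PySem.Chars.isalnum ')' = false)]
          simp only [if_neg hcp, if_pos rfl, hF, Bool.false_eq_true, if_false]
          cases d with
          | zero => rfl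
          | succ d' =>
            simp only [List.replicate_succ]
            exact hIH d' (some ')')
        · by_cases hop : pvIsOperatorA c = true
          · have hal : PySem.Chars.isalnum c = false := by
              have hall : pvValidCharsA.all
                  (fun x => !(pvIsOperatorA x && PySem.Chars.isalnum x)) = true := by decide
              have h2 := List.all_eq_true.mp hall c (by simpa using hv)
              simp only [Bool.not_eq_eq_eq_not, Bool.not_true, Bool.and_eq_false_iff] at h2
              rcases h2 with h | h
              · exact absurd h (by simp [hop])
              · exact h
            have hF : pvF last c = some c := by simp [pvF, hal]
            simp only [if_neg hcp, if_neg hcq, if_pos hop, hF, Bool.false_eq_true, if_false]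
            cases done with
            | nil =>
              by_cases hd : (c != '-') = true
              · simp [hd]
              · have hd' : (c != '-') = false := by simpa using hd
                simp only [List.length_nil, List.getLast?_nil, Option.elim, hd',
                  Bool.and_false, Bool.false_eq_true, if_false,
                  (by decide : ((0:Nat) == 0) = true), Bool.true_and,
                  (by decide : decide ((0:Nat) < 0) = false), Bool.false_and]
                exact hIH d (some c)
            | cons e es =>
              have hprev : (((e :: es) ++ [c]) ++ cs)[(e :: es).length - 1]? =
                  (e :: es).getLast? := by
                rw [List.getElem?_append_left (by simp), List.getElem?_append_left (by simp),
                  List.getLast?_eq_getElem?]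
              obtain ⟨g, hg⟩ := Option.isSome_iff_exists.mp
                ((List.getLast?_isSome (l := e :: es)).mpr (by simp))
              rw [hprev, hg]
              simp only [Option.elim, (by simp : ((e :: es).length == 0) = false),
                Bool.false_and, Bool.false_eq_true, if_false,
                (by simp : decide (0 < (e :: es).length) = true), Bool.true_and]
              by_cases hbad : (pvIsOperatorA g && c != '-') = true
              · rw [if_pos hbad, if_pos hbad]
                rfl
              · rw [if_neg hbad, if_neg hbad]
                exact hIH d (some c)
          · simp only [if_neg hcp, if_neg hcq, if_neg hop, Bool.false_eq_true, if_false]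
            by_cases hal : PySem.Chars.isalnum c = true
            · by_cases hl : last.elim false PySem.Chars.isalnum = true
              · have hF2 : pvF last c = last := by simp [pvF, hal, hl]
                rw [if_pos hal, if_pos hl, hF2]
                exact hIH d last
              · have hl' : last.elim false PySem.Chars.isalnum = false := by simpa using hl
                have hF2 : pvF last c = some c := by simp [pvF, hl']
                rw [if_pos hal, hl', if_neg (by simp), hF2]
                exact hIH d (some c)
            · have hal' : PySem.Chars.isalnum c = false := by simpa using hal
              have hF2 : pvF last c = some c := by simp [pvF, hal']
              rw [if_neg hal, hF2]
              exact hIH d (some c)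
    · have hv' : pvValidCharsA.contains c = false := by simpa using hv
      rw [hv']
      rfl

lemma pvFoldF_concat (t : List Char) (cl : Char) (last : Option Char) :
    ∃ c', (t ++ [cl]).foldl pvF last = some c' ∧
      (PySem.Chars.isalnum c' || c' == ')') = (PySem.Chars.isalnum cl || cl == ')') := by
  rw [List.foldl_append]
  generalize t.foldl pvF last = A
  simp only [List.foldl_cons, List.foldl_nil]
  unfold pvF
  split
  · rename_i h
    simp only [Bool.and_eq_true] at h
    obtain ⟨h1, h2⟩ := h
    cases A with
    | none => simp at h2
    | some a => exact ⟨a, rfl, by simp_all⟩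
  · exact ⟨cl, rfl, rfl⟩

lemma pvCore_eq (l : List Char) :
    (match pvALoop l l 0 [] none with
      | none => false
      | some (stack, last) =>
        if !stack.isEmpty || last.elim false (fun c => !(PySem.Chars.isalnum c || c == ')')) then false
        else true) =
    (if l.isEmpty then true
     else if l.any (fun c => !pvAllowedB.contains c) then false
     else
       match pvDepthLoop l 0 with
       | none => false
       | some d =>
         if d != 0 then false
         else if !pvOpLoop l none then false
         else l.getLast?.elim false (fun c => PySem.Chars.isalnum c || c == ')')) := by
  have hA := pvALoop_eq l [] 0 none
  simp only [List.nil_append, List.length_nil, List.replicate_zero, List.getLast?_nil] at hA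
  rw [hA, pvRef_eq l none 0 trivial]
  rcases List.eq_nil_or_concat l with rfl | ⟨t, cl, rfl⟩
  · rfl
  · rw [List.concat_eq_append]
    have hg : (t ++ [cl]).getLast? = some cl := List.getLast?_concat
    obtain ⟨c', hc', hgc⟩ := pvFoldF_concat t cl none
    rw [if_neg (by simp : ¬ ((t ++ [cl]).isEmpty = true)), hg]
    by_cases hAll : ((t ++ [cl]).all fun c => pvValidCharsA.contains c) = true
    · have hAny : ((t ++ [cl]).any fun c => !pvAllowedB.contains c) = false := by
        cases hq : (t ++ [cl]).any fun c => !pvAllowedB.contains c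
        · rfl
        · exfalso
          obtain ⟨x, hx1, hx2⟩ := List.any_eq_true.mp hq
          rw [List.all_eq_true] at hAll
          have hv := hAll x hx1
          simp only [show pvAllowedB = pvValidCharsA from rfl] at hx2
          rw [hv] at hx2
          simp at hx2
      rw [hAny, hAll, Bool.true_and]
      simp only [Bool.false_eq_true, if_false]
      by_cases hOp : pvOpLoop (t ++ [cl]) none = true
      · rw [hOp, if_pos rfl]
        cases hD : pvDepthLoop (t ++ [cl]) 0 with
        | none => rfl
        | some d =>
          cases d with
          | zero =>
            simp only [Option.map_some, List.replicate_zero, List.isEmpty_nil,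
              Bool.not_false, Bool.false_or, hc', Option.elim, hOp, Bool.not_true,
              Bool.false_eq_true, if_false, bne_self_eq_false]
            rw [hgc]
            cases hx : (PySem.Chars.isalnum cl || cl == ')') <;> simp
          | succ d' => simp [List.replicate_succ]
      · have hOp' : pvOpLoop (t ++ [cl]) none = false := by simpa using hOp
        rw [hOp']
        cases hD : pvDepthLoop (t ++ [cl]) 0 with
        | none => simp [hD]
        | some d => simp [hD]
    · have hAll' : ((t ++ [cl]).all fun c => pvValidCharsA.contains c) = false := by
        simpa using hAll
      have hAny : ((t ++ [cl]).any fun c => !pvAllowedB.contains c) = true := by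
        simp only [List.all_eq_true, not_forall] at hAll
        obtain ⟨x, hx, hcx⟩ := hAll
        rw [List.any_eq_true]
        refine ⟨x, hx, ?_⟩
        simp only [show pvAllowedB = pvValidCharsA from rfl]
        simpa using hcx
      rw [hAll', Bool.false_and, hAny, if_pos rfl]
      rfl

-- ===== VERDICT (by name: the statement is the Claim_ definition above) =====
set_option maxHeartbeats 1000000 in
theorem is_valid_expression_spec : Claim_equal_is_valid_expression := by
  intro expression _
  show is_valid_expression expression = is_valid_expression_alt expression
  simp only [is_valid_expression, is_valid_expression_alt]
  generalize (PySem.Str.replace (PySem.Str.replace (PySem.Str.replace expression "−" "-") "∗" "*") " " "").toList = l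
  exact pvCore_eq l
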